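-- pv_equiv track=rewrite | github.com/YousraTouriaGaid/projetPython | projetPython/theme4/exStock.py | calcul_stock
-- ===== SOURCE A (Python) =====
-- def calcul_stock(n):
--     stock = 1024
--     stocks = [stock]
--     for semaine in range(2, n + 1):
--         stock -= (20 + semaine)
--         if semaine % 4 == 0:
--             stock += 500
--         stocks.append(stock)
--     return stocks
-- ===== SOURCE B (Python) =====
-- def calcul_stock(n):
--     # closed form per week: stock(k) = 1024 - 20*(k-1) - (k*(k+1)//2 - 1) + 500*(k//4)
--     return [1024 - 20 * (k - 1) - (k * (k + 1) // 2 - 1) + 500 * (k // 4)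
--             for k in range(1, max(n, 1) + 1)]
-- ===== Notes on version B (the rewrite author's own statement) =====
-- stated objective: alternative
-- what changed: Replaces A's running-accumulator loop with a per-week closed-form formula (arithmetic series for the decrements, k//4 for the bonuses) emitted by a single list comprehension.
import Mathlib
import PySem

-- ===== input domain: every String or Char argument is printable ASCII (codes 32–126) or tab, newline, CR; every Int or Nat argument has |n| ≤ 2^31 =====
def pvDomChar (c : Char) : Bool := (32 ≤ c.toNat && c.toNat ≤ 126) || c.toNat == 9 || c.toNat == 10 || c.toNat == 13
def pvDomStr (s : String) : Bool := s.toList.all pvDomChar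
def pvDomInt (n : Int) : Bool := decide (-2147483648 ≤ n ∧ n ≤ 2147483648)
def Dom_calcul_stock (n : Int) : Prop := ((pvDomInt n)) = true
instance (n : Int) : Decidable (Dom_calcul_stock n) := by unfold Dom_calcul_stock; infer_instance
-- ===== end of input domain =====

-- B replaces A's running accumulator with a per-week closed-form formula (alternative decomposition).

-- ===== PORT A =====
-- literal port: running stock, appended each week of range(2, n+1)
def calcul_stock (n : Int) : List Int :=
  (PySem.List.pyRange 2 (n + 1) 1).foldl
    (fun (st : Int × List Int) semaine =>
      let stock := st.1 - (20 + semaine)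
      let stock := if PySem.Int.mod semaine 4 == 0 then stock + 500 else stock
      (stock, st.2 ++ [stock]))
    (1024, [1024]) |>.2

-- ===== PORT B =====
-- literal port of Source B: closed form per week, list comprehension over range(1, max(n,1)+1)
def calcul_stock_alt (n : Int) : List Int :=
  (PySem.List.pyRange 1 (max n 1 + 1) 1).map
    (fun k => 1024 - 20 * (k - 1) - (PySem.Int.floordiv (k * (k + 1)) 2 - 1)
              + 500 * PySem.Int.floordiv k 4)

-- ===== PRECONDITION & SPEC =====
def Spec_calcul_stock (n : Int) (out : List Int) : Prop := out = calcul_stock_alt n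
instance (n : Int) (out : List Int) : Decidable (Spec_calcul_stock n out) := by unfold Spec_calcul_stock; infer_instance

-- ===== CLAIM (what is proved, stated in full; the proofs are below) =====
def Claim_equal_calcul_stock : Prop := ∀ (n : Int), Dom_calcul_stock n → Spec_calcul_stock n (calcul_stock n)

-- ===== LEMMAS AND PROOFS =====

-- the closed form used by B
def pvF (k : Int) : Int :=
  1024 - 20 * (k - 1) - (PySem.Int.floordiv (k * (k + 1)) 2 - 1)
    + 500 * PySem.Int.floordiv k 4

-- one step of A's loop
def pvStep (st : Int × List Int) (semaine : Int) : Int × List Int :=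
  let stock := st.1 - (20 + semaine)
  let stock := if PySem.Int.mod semaine 4 == 0 then stock + 500 else stock
  (stock, st.2 ++ [stock])

lemma pvF_step (k : Int) :
    (if PySem.Int.mod k 4 == 0 then pvF (k - 1) - (20 + k) + 500
     else pvF (k - 1) - (20 + k)) = pvF k := by
  unfold pvF
  rw [PySem.Int.mod_eq_emod_of_pos (a := k) (by omega),
      PySem.Int.floordiv_eq_ediv_of_pos (a := k * (k + 1)) (by omega),
      PySem.Int.floordiv_eq_ediv_of_pos (a := (k - 1) * (k - 1 + 1)) (by omega),
      PySem.Int.floordiv_eq_ediv_of_pos (a := k) (b := 4) (by omega),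
      PySem.Int.floordiv_eq_ediv_of_pos (a := k - 1) (b := 4) (by omega),
      (by ring : k * (k + 1) = (k - 1) * (k - 1 + 1) + 2 * k)]
  generalize (k - 1) * (k - 1 + 1) = x
  simp only [beq_iff_eq]
  split_ifs with h4 <;> omega

lemma pvLoop (m : Nat) :
    (PySem.List.pyRange 2 (2 + (m : Int)) 1).foldl pvStep (1024, [1024])
      = (pvF (1 + (m : Int)), (PySem.List.pyRange 1 (2 + (m : Int)) 1).map pvF) := by
  induction m with
  | zero => norm_num; decide
  | succ m ih =>
      have hc : ((m + 1 : Nat) : Int) = (m : Int) + 1 := by push_cast; ring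
      rw [hc, (by ring : (2 : Int) + ((m : Int) + 1) = (2 + (m : Int)) + 1),
          PySem.List.pyRange_one_succ_right (by omega : (2 : Int) ≤ 2 + (m : Int)),
          PySem.List.pyRange_one_succ_right (by omega : (1 : Int) ≤ 2 + (m : Int)),
          List.foldl_append, ih, List.map_append]
      have hf := pvF_step (2 + (m : Int))
      rw [(by ring : (2 : Int) + (m : Int) - 1 = 1 + (m : Int))] at hf
      show pvStep (pvF (1 + (m : Int)), _) (2 + (m : Int)) = _
      unfold pvStep
      simp only []
      rw [hf, (by ring : (1 : Int) + ((m : Int) + 1) = 2 + (m : Int))]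
      simp

theorem calcul_stock_spec : Claim_equal_calcul_stock := by
  intro n _
  unfold Spec_calcul_stock calcul_stock calcul_stock_alt
  by_cases hn : n ≤ 1
  · rw [PySem.List.pyRange_one_eq_nil (by omega : n + 1 ≤ 2),
        (by omega : max n 1 = 1)]
    decide
  · have hmax : max n 1 = n := by omega
    have h2 : n + 1 = 2 + (((n - 1).toNat : ℕ) : Int) := by omega
    have key := pvLoop (n - 1).toNat
    rw [hmax, h2]
    show ((PySem.List.pyRange 2 (2 + (((n - 1).toNat : ℕ) : Int)) 1).foldl pvStep (1024, [1024])).2 = _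
    rw [key]
    rfl
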